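-- pv_equiv track=rewrite | github.com/Lzh-hub-theo/maze-ai | Maze_AI/run/manhattan_distance.py | compute_distance_score
-- ===== SOURCE A (Python) =====
-- from collections import deque
--
-- def compute_distance_score(maze):
--     """
--     计算迷宫每个位置到终点(3)的最短步数
--     起点(9)为坦克初始位置，终点(3)为最终目标
--     每个格子的值 = 从这个点到终点(3)的最短步数
--     """
--     rows = len(maze)
--     cols = len(maze[0])
--
--     # 1. 寻找终点坐标 (值为3) - 作为BFS起点
--     end = None
--     for r in range(rows):
--         for c in range(cols):
--             if maze[r][c] == 3:
--                 end = (r, c)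
--                 break
--         if end:
--             break
--
--     if not end:
--         raise ValueError("迷宫中未找到终点（值为3的格子）")
--
--     # 2. BFS 计算从终点(3)到每个位置的最短距离
--     dist = [[-1] * cols for _ in range(rows)]   # -1 表示未访问/不可达
--     q = deque()
--     er, ec = end
--     dist[er][ec] = 0
--     q.append((er, ec))
--
--     # 四个方向：上，下，左，右
--     directions = [(-1, 0), (1, 0), (0, -1), (0, 1)]
--
--     while q:
--         r, c = q.popleft()
--         for dr, dc in directions:
--             nr, nc = r + dr, c + dc
--             if 0 <= nr < rows and 0 <= nc < cols:
--                 # 墙壁(1)不可通过，其他(0,3,9)均视为可通行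
--                 if maze[nr][nc] != 1 and dist[nr][nc] == -1:
--                     dist[nr][nc] = dist[r][c] + 1
--                     q.append((nr, nc))
--
--     # 3. 不可达位置分数设为很大的正数（agent不应该去那里）
--     # 可达位置为到终点的步数
--     max_reachable_dist = max(dist[r][c] for r in range(rows) for c in range(cols) if dist[r][c] != -1)
--     INFINITE_DIST = max_reachable_dist + 100  # 比最远可达距离大100，确保不可达区域的shaping为负
--
--     score = [[0] * cols for _ in range(rows)]
--     for r in range(rows):
--         for c in range(cols):
--             if dist[r][c] == -1:
--                 # 不可达位置设为 INFINITE_DIST（很大的正数）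
--                 # 当agent误入这些区域时，moving away会得到负reward
--                 score[r][c] = INFINITE_DIST
--             else:
--                 score[r][c] = dist[r][c]
--
--     return score
-- ===== SOURCE B (Python) =====
-- def compute_distance_score(maze):
--     """
--     Level-synchronous relaxation: distances are computed layer by layer
--     (all cells at distance d, then all at d+1, ...) instead of a FIFO queue.
--     """
--     rows = len(maze)
--     cols = len(maze[0])
--
--     # find the goal cell (value 3) with the same nested scan as the original
--     end = None
--     for r in range(rows):
--         for c in range(cols):
--             if maze[r][c] == 3:
--                 end = (r, c)
--                 break
--         if end:
--             break
--     if not end: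
--         raise ValueError("迷宫中未找到终点（值为3的格子）")
--
--     dist = [[-1] * cols for _ in range(rows)]
--     er, ec = end
--     dist[er][ec] = 0
--
--     # expand distance layers: frontier holds every cell at distance d
--     frontier = [(er, ec)]
--     d = 0
--     while frontier:
--         nxt = []
--         for r, c in frontier:
--             for nr, nc in ((r - 1, c), (r + 1, c), (r, c - 1), (r, c + 1)):
--                 if 0 <= nr < rows and 0 <= nc < cols and maze[nr][nc] != 1 and dist[nr][nc] == -1:
--                     dist[nr][nc] = d + 1
--                     nxt.append((nr, nc))
--         frontier = nxt
--         d += 1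
--
--     m = max(v for row in dist for v in row if v != -1)
--     inf = m + 100
--     return [[inf if v == -1 else v for v in row] for row in dist]
-- ===== Notes on version B (the rewrite author's own statement) =====
-- stated objective: alternative
-- what changed: Replaces the deque-based BFS (pop one cell, push its neighbors, distance read back from the grid) by level-synchronous layer expansion: a frontier list of all cells at distance d is relaxed in one batch to produce the d+1 layer, with no queue and the distance taken from a layer counter; goal scan is the same, max/score are built by flat comprehensions instead of index loops.
-- outside the precondition, e.g. on compute_distance_score([[3, 1], [1]]): A returns [[0, 100], [100, 100]], B returns [[0, 100], [100, 100]]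
import Mathlib
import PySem

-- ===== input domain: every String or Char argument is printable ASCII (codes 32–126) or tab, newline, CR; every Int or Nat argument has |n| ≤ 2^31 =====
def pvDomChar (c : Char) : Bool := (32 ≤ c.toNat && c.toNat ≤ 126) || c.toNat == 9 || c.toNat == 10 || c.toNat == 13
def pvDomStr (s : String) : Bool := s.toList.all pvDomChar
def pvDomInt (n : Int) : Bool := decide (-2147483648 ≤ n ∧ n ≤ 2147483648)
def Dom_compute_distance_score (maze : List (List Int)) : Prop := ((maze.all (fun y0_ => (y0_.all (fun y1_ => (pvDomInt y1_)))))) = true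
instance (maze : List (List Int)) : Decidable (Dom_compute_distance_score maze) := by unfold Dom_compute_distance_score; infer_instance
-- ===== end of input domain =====

-- B replaces A's deque BFS by level-synchronous layer expansion (no queue, distance = a layer
-- counter) and builds max/score by flat maps instead of index loops; same return value, no mutation
-- of the argument in either version.

-- ===== PORT A =====
-- shared 2-D grid read maze[r][c] / dist[r][c] (only evaluated after Python's own bound checks)
def gget (g : List (List Int)) (r c : Int) : Int := (g.getD r.toNat []).getD c.toNat 0
-- shared in-place assignment dist[r][c] = v
def set2 (g : List (List Int)) (r c : Nat) (v : Int) : List (List Int) :=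
  g.set r ((g.getD r []).set c v)

-- A's goal scan: 'for c in range(cols): if maze[r][c] == 3: end = (r, c); break'
def scanRowA (row : List Int) : Nat → Nat → Option Nat
  | _, 0 => none
  | c, k + 1 => if row.getD c 0 = 3 then some c else scanRowA row (c + 1) k
-- 'for r in range(rows): … ; if end: break' (shared by B, whose scan is the same Python code)
def scanGridA (maze : List (List Int)) (cols : Nat) : Nat → Nat → Option (Nat × Nat)
  | _, 0 => none
  | r, k + 1 =>
    match scanRowA (maze.getD r []) 0 cols with
    | some c => some (r, c)
    | none => scanGridA maze cols (r + 1) k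

-- directions = [(-1,0),(1,0),(0,-1),(0,1)]
def pvDirs : List (Int × Int) := [(-1, 0), (1, 0), (0, -1), (0, 1)]

-- body of A's 'for dr, dc in directions' : relax one neighbour of (r, c)
def relaxA (maze : List (List Int)) (rows cols r c : Int)
    (s : List (List Int) × List (Int × Int)) (d : Int × Int) :
    List (List Int) × List (Int × Int) :=
  let nr := r + d.1
  let nc := c + d.2
  if 0 ≤ nr ∧ nr < rows ∧ 0 ≤ nc ∧ nc < cols ∧ gget maze nr nc ≠ 1 ∧ gget s.1 nr nc = -1 then
    (set2 s.1 nr.toNat nc.toNat (gget s.1 r c + 1), s.2 ++ [(nr, nc)])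
  else s

-- one dequeued cell: try all four directions, collecting the enqueued cells
def stepA (maze : List (List Int)) (rows cols : Int)
    (s : List (List Int) × List (Int × Int)) (cell : Int × Int) :
    List (List Int) × List (Int × Int) :=
  pvDirs.foldl (relaxA maze rows cols cell.1 cell.2) s

-- 'while q: r, c = q.popleft(); …' (fuel rows*cols+1 bounds the dequeues; each enqueue
-- turns a -1 cell nonnegative, so the loop makes at most rows*cols+1 iterations)
def loopA (maze : List (List Int)) (rows cols : Int) :
    Nat → List (List Int) → List (Int × Int) → List (List Int)
  | _, dist, [] => dist
  | 0, dist, _ => dist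
  | f + 1, dist, cell :: q =>
    let s := stepA maze rows cols (dist, []) cell
    loopA maze rows cols f s.1 (q ++ s.2)

-- 'max(dist[r][c] for r in range(rows) for c in range(cols) if dist[r][c] != -1)'
def maxReachA (dist : List (List Int)) (rows cols : Nat) : Int :=
  (PySem.List.max?
    ((List.range rows).flatMap (fun r =>
      (List.range cols).filterMap (fun c =>
        let v := (dist.getD r []).getD c 0
        if v ≠ -1 then some v else none)))
    (fun x => x)).getD 0

-- the final double loop writing into 'score'
def scoreA (dist : List (List Int)) (rows cols : Nat) (inf : Int) : List (List Int) :=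
  (List.range rows).foldl (fun score r =>
    (List.range cols).foldl (fun score c =>
      let v := (dist.getD r []).getD c 0
      set2 score r c (if v = -1 then inf else v)) score)
    (List.replicate rows (List.replicate cols 0))

def compute_distance_score (maze : List (List Int)) : List (List Int) :=
  let rows := maze.length
  let cols := (maze.headD []).length
  match scanGridA maze cols 0 rows with
  | none => []  -- Python raises ValueError here; excluded by Pre_
  | some (er, ec) =>
    let dist0 := set2 (List.replicate rows (List.replicate cols (-1))) er ec 0
    let dist := loopA maze (rows : Int) (cols : Int) (rows * cols + 1) dist0
      [((er : Int), (ec : Int))]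
    let inf := maxReachA dist rows cols + 100
    scoreA dist rows cols inf

-- ===== PORT B =====
-- body of B's 'for nr, nc in ((r-1,c), (r+1,c), (r,c-1), (r,c+1))' at layer lvl
def relaxB (maze : List (List Int)) (rows cols : Int) (lvl : Int)
    (s : List (List Int) × List (Int × Int)) (n : Int × Int) :
    List (List Int) × List (Int × Int) :=
  if 0 ≤ n.1 ∧ n.1 < rows ∧ 0 ≤ n.2 ∧ n.2 < cols ∧ gget maze n.1 n.2 ≠ 1 ∧ gget s.1 n.1 n.2 = -1 then
    (set2 s.1 n.1.toNat n.2.toNat (lvl + 1), s.2 ++ [n])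
  else s

-- one frontier cell: its four neighbour tuples
def stepB (maze : List (List Int)) (rows cols : Int) (lvl : Int)
    (s : List (List Int) × List (Int × Int)) (cell : Int × Int) :
    List (List Int) × List (Int × Int) :=
  [(cell.1 - 1, cell.2), (cell.1 + 1, cell.2),
   (cell.1, cell.2 - 1), (cell.1, cell.2 + 1)].foldl (relaxB maze rows cols lvl) s

-- 'while frontier: … frontier = nxt; d += 1' (same fuel bound as loopA)
def loopB (maze : List (List Int)) (rows cols : Int) :
    Nat → List (List Int) → List (Int × Int) → Int → List (List Int)
  | 0, dist, _, _ => dist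
  | f + 1, dist, frontier, lvl =>
    match frontier with
    | [] => dist
    | _ :: _ =>
      let s := frontier.foldl (stepB maze rows cols lvl) (dist, [])
      loopB maze rows cols f s.1 s.2 (lvl + 1)

def compute_distance_score_alt (maze : List (List Int)) : List (List Int) :=
  let rows := maze.length
  let cols := (maze.headD []).length
  match scanGridA maze cols 0 rows with  -- B's goal scan is the same Python code as A's
  | none => []  -- Python raises ValueError here; excluded by Pre_
  | some (er, ec) =>
    let dist0 := set2 (List.replicate rows (List.replicate cols (-1))) er ec 0
    let dist := loopB maze (rows : Int) (cols : Int) (rows * cols + 1) dist0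
      [((er : Int), (ec : Int))] 0
    let inf := (PySem.List.max? (dist.flatMap (fun row => row.filter (fun v => v != -1)))
      (fun x => x)).getD 0 + 100
    dist.map (fun row => row.map (fun v => if v = -1 then inf else v))

-- ===== PRECONDITION & SPEC =====
-- Pre_ excludes the empty maze (A raises IndexError on maze[0]), mazes without a goal cell 3
-- (A raises ValueError), and ragged mazes with a row shorter than len(maze[0]): there whether A
-- raises IndexError depends on which cells BFS reaches, which is not a closed-form shape condition,
-- so the whole ragged class is excluded (B behaves exactly like A on it anyway).
def Pre_compute_distance_score (maze : List (List Int)) : Prop :=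
  maze ≠ [] ∧ (∀ row ∈ maze, (maze.headD []).length ≤ row.length) ∧
  ∃ r < maze.length, ∃ c < (maze.headD []).length, (maze.getD r []).getD c 0 = 3
instance (maze : List (List Int)) : Decidable (Pre_compute_distance_score maze) := by
  unfold Pre_compute_distance_score; infer_instance
def pvWitness_compute_distance_score : List (List Int) := [[0, 3], [1, 0]]

def Spec_compute_distance_score (maze : List (List Int)) (out : List (List Int)) : Prop := out = compute_distance_score_alt maze
instance (maze : List (List Int)) (out : List (List Int)) : Decidable (Spec_compute_distance_score maze out) := by unfold Spec_compute_distance_score; infer_instance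

-- ===== CLAIM (what is proved, stated in full; the proofs are below) =====
def Claim_equal_compute_distance_score : Prop := ∀ (maze : List (List Int)), Dom_compute_distance_score maze → Pre_compute_distance_score maze → Spec_compute_distance_score maze (compute_distance_score maze)

-- ===== LEMMAS AND PROOFS =====

-- shape of a rows × cols grid
def ShapeG (R C : Nat) (g : List (List Int)) : Prop :=
  g.length = R ∧ ∀ row ∈ g, row.length = C

-- in-bounds cell
def InB (R C : Nat) (p : Int × Int) : Prop :=
  0 ≤ p.1 ∧ p.1 < (R : Int) ∧ 0 ≤ p.2 ∧ p.2 < (C : Int)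

-- number of unassigned (-1) cells
def countNeg (g : List (List Int)) : Nat := (g.map (fun row => row.count (-1))).sum

theorem getD_set_ne {α : Type} (l : List α) (i j : Nat) (a d : α) (h : i ≠ j) :
    (l.set i a).getD j d = l.getD j d := by
  simp [List.getD_eq_getElem?_getD, List.getElem?_set_ne h]

theorem getD_set_self {α : Type} (l : List α) (i : Nat) (a d : α) (h : i < l.length) :
    (l.set i a).getD i d = a := by
  simp [List.getD_eq_getElem?_getD, List.getElem?_set_self h]

theorem countNeg_cons (x : List Int) (xs : List (List Int)) :
    countNeg (x :: xs) = x.count (-1) + countNeg xs := by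
  simp [countNeg]

theorem gget_set2_ne (g : List (List Int)) (a b : Nat) (v : Int) (r c : Int)
    (h : ¬(a = r.toNat ∧ b = c.toNat)) : gget (set2 g a b v) r c = gget g r c := by
  by_cases hr : a = r.toNat
  · subst hr
    have hb : b ≠ c.toNat := fun hh => h ⟨rfl, hh⟩
    unfold gget set2
    rcases Nat.lt_or_ge r.toNat g.length with hlt | hge
    · rw [getD_set_self _ _ _ _ hlt, getD_set_ne _ _ _ _ _ hb]
    · rw [List.set_eq_of_length_le hge]
  · unfold gget set2
    rw [getD_set_ne _ _ _ _ _ hr]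

theorem gget_set2_self (g : List (List Int)) (a b : Nat) (v : Int) (r c : Int)
    (ha : a < g.length) (hb : b < (g.getD a []).length)
    (hr : r.toNat = a) (hc : c.toNat = b) : gget (set2 g a b v) r c = v := by
  subst hr hc
  unfold gget set2
  rw [getD_set_self _ _ _ _ ha, getD_set_self _ _ _ _ hb]

theorem shape_set2 (R C : Nat) (g : List (List Int)) (a b : Nat) (v : Int)
    (h : ShapeG R C g) : ShapeG R C (set2 g a b v) := by
  obtain ⟨h1, h2⟩ := h
  rcases Nat.lt_or_ge a g.length with ha | ha
  · refine ⟨by simpa [set2] using h1, fun row hrow => ?_⟩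
    rcases List.mem_or_eq_of_mem_set hrow with h3 | h3
    · exact h2 _ h3
    · subst h3
      have hg : g.getD a [] = g[a] := by
        simp [List.getD_eq_getElem?_getD, List.getElem?_eq_getElem ha]
      rw [List.length_set, hg]
      exact h2 _ (List.getElem_mem ha)
  · unfold set2
    rw [List.set_eq_of_length_le ha]
    exact ⟨h1, h2⟩

theorem countNeg_set2 (g : List (List Int)) (a b : Nat) (v : Int)
    (ha : a < g.length) (hb : b < (g.getD a []).length)
    (hold : (g.getD a []).getD b 0 = -1) (hv : v ≠ -1) :
    countNeg (set2 g a b v) + 1 = countNeg g := by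
  induction g generalizing a with
  | nil => simp at ha
  | cons x xs ih =>
    cases a with
    | zero =>
      have hx : x[b] = -1 := by
        have := hold
        simpa [List.getD_eq_getElem?_getD, List.getElem?_eq_getElem (by simpa using hb)] using this
      have hcnt : 1 ≤ x.count (-1) := List.count_pos_iff.mpr (hx ▸ List.getElem_mem (by simpa using hb))
      have : (x.set b v).count (-1) = (x.count (-1) - if (x[b] == -1) = true then 1 else 0) +
          if (v == -1) = true then 1 else 0 := List.count_set (by simpa using hb)
      simp only [set2, List.getD_cons_zero, List.set_cons_zero] at *
      rw [countNeg_cons, countNeg_cons, this]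
      simp [hx, hv]
      omega
    | succ a' =>
      have hrec := ih a' (by simpa using ha) (by simpa using hb) (by simpa using hold)
      have hs : set2 (x :: xs) (a' + 1) b v = x :: set2 xs a' b v := by
        simp [set2]
      rw [hs, countNeg_cons, countNeg_cons]
      omega

theorem foldl_acc {γ : Type} (f : (List (List Int) × List (Int × Int)) → γ →
      (List (List Int) × List (Int × Int)))
    (hf : ∀ d a x, f (d, a) x = ((f (d, []) x).1, a ++ (f (d, []) x).2)) :
    ∀ (l : List γ) (d : List (List Int)) (a : List (Int × Int)),
      l.foldl f (d, a) = ((l.foldl f (d, [])).1, a ++ (l.foldl f (d, [])).2) := by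
  intro l
  induction l with
  | nil => simp
  | cons x t ih =>
    intro d a
    simp only [List.foldl_cons]
    rw [hf d a x, hf d [] x]
    rcases h1 : f (d, []) x with ⟨d1, g1⟩
    simp only
    simp only [List.nil_append]
    rw [ih d1 (a ++ g1), ih d1 g1]
    simp

theorem relaxA_acc (maze : List (List Int)) (rows cols r c : Int) :
    ∀ d a x, relaxA maze rows cols r c (d, a) x =
      ((relaxA maze rows cols r c (d, []) x).1, a ++ (relaxA maze rows cols r c (d, []) x).2) := by
  intro d a x
  simp only [relaxA]
  split_ifs with h <;> simp

theorem stepA_acc (maze : List (List Int)) (rows cols : Int) :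
    ∀ d a x, stepA maze rows cols (d, a) x =
      ((stepA maze rows cols (d, []) x).1, a ++ (stepA maze rows cols (d, []) x).2) := by
  intro d a x
  simp only [stepA]
  exact foldl_acc _ (relaxA_acc maze rows cols x.1 x.2) pvDirs d a

-- one level of A's queue consumes its cells in order and leaves the enqueued layer behind
theorem loopA_level (maze : List (List Int)) (rows cols : Int) :
    ∀ (xs ys : List (Int × Int)) (dist : List (List Int)) (f : Nat),
      loopA maze rows cols (f + xs.length) dist (xs ++ ys) =
        loopA maze rows cols f (xs.foldl (stepA maze rows cols) (dist, [])).1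
          (ys ++ (xs.foldl (stepA maze rows cols) (dist, [])).2) := by
  intro xs
  induction xs with
  | nil => intro ys dist f; simp
  | cons x xs ih =>
    intro ys dist f
    have h2 : f + (x :: xs).length = (f + xs.length) + 1 := by simp [List.length_cons]; omega
    rw [List.cons_append, h2]
    simp only [loopA]
    rcases hs : stepA maze rows cols (dist, []) x with ⟨d1, n1⟩
    simp only [List.foldl_cons, hs]
    rw [List.append_assoc, ih (ys ++ n1) d1 f,
      foldl_acc _ (stepA_acc maze rows cols) xs d1 n1]
    simp

-- the combined per-layer specification: A's fold equals B's fold, shapes, counts, invariants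
theorem gget_congr (g : List (List Int)) (a b a' b' : Int)
    (h1 : a.toNat = a'.toNat) (h2 : b.toNat = b'.toNat) : gget g a b = gget g a' b' := by
  unfold gget; rw [h1, h2]

theorem pres_set2 (dist : List (List Int)) (a b : Int) (w : Int)
    (hold : gget dist a b = -1) :
    ∀ r' c' v, v ≠ -1 → gget dist r' c' = v → gget (set2 dist a.toNat b.toNat w) r' c' = v := by
  intro r' c' v hv hg
  by_cases h : a.toNat = r'.toNat ∧ b.toNat = c'.toNat
  · exact absurd (hg ▸ (gget_congr dist a b r' c' h.1 h.2).symm.trans hold) (by simpa using hv)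
  · rw [gget_set2_ne _ _ _ _ _ _ h, hg]

theorem relax_spec (maze : List (List Int)) (R C : Nat) (lvl : Int) (hlvl : 0 ≤ lvl)
    (r c : Int) (dist : List (List Int)) (acc : List (Int × Int)) (dir : Int × Int)
    (hsh : ShapeG R C dist) (hrc : gget dist r c = lvl)
    (hacc : ∀ p ∈ acc, InB R C p ∧ gget dist p.1 p.2 = lvl + 1) :
    (relaxA maze (R : Int) (C : Int) r c (dist, acc) dir =
      relaxB maze (R : Int) (C : Int) lvl (dist, acc) (r + dir.1, c + dir.2)) ∧
    (let s := relaxA maze (R : Int) (C : Int) r c (dist, acc) dir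
     ShapeG R C s.1 ∧ countNeg s.1 + s.2.length = countNeg dist + acc.length ∧
     (∀ r' c' v, v ≠ -1 → gget dist r' c' = v → gget s.1 r' c' = v) ∧
     (∀ p ∈ s.2, InB R C p ∧ gget s.1 p.1 p.2 = lvl + 1)) := by
  by_cases hC : 0 ≤ r + dir.1 ∧ r + dir.1 < (R : Int) ∧ 0 ≤ c + dir.2 ∧ c + dir.2 < (C : Int) ∧
      gget maze (r + dir.1) (c + dir.2) ≠ 1 ∧ gget dist (r + dir.1) (c + dir.2) = -1
  · obtain ⟨h1, h2, h3, h4, h5, h6⟩ := hC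
    have hra : relaxA maze (R : Int) (C : Int) r c (dist, acc) dir =
        (set2 dist (r + dir.1).toNat (c + dir.2).toNat (gget dist r c + 1),
          acc ++ [(r + dir.1, c + dir.2)]) := by
      simp only [relaxA]
      rw [if_pos ⟨h1, h2, h3, h4, h5, h6⟩]
    have hrb : relaxB maze (R : Int) (C : Int) lvl (dist, acc) (r + dir.1, c + dir.2) =
        (set2 dist (r + dir.1).toNat (c + dir.2).toNat (lvl + 1),
          acc ++ [(r + dir.1, c + dir.2)]) := by
      simp only [relaxB]
      rw [if_pos ⟨h1, h2, h3, h4, h5, h6⟩]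
    have hrowlen : (dist.getD (r + dir.1).toNat []).length = C := by
      have hlt : (r + dir.1).toNat < dist.length := by
        rw [hsh.1]; omega
      have : dist.getD (r + dir.1).toNat [] = dist[(r + dir.1).toNat] := by
        simp [List.getD_eq_getElem?_getD, List.getElem?_eq_getElem hlt]
      rw [this]
      exact hsh.2 _ (List.getElem_mem hlt)
    have hlt1 : (r + dir.1).toNat < dist.length := by rw [hsh.1]; omega
    have hlt2 : (c + dir.2).toNat < (dist.getD (r + dir.1).toNat []).length := by
      rw [hrowlen]; omega
    have hpres := pres_set2 dist (r + dir.1) (c + dir.2) (lvl + 1) h6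
    refine ⟨by rw [hra, hrb, hrc], ?_⟩
    rw [hra]
    refine ⟨shape_set2 _ _ _ _ _ _ hsh, ?_, ?_, ?_⟩
    · have := countNeg_set2 dist (r + dir.1).toNat (c + dir.2).toNat (gget dist r c + 1)
        hlt1 hlt2 h6 (by rw [hrc]; omega)
      simp only [List.length_append, List.length_cons, List.length_nil]
      omega
    · rw [hrc]
      exact pres_set2 dist (r + dir.1) (c + dir.2) (lvl + 1) h6
    · intro p hp
      rcases List.mem_append.mp hp with hp | hp
      · obtain ⟨hi, hv⟩ := hacc p hp
        refine ⟨hi, ?_⟩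
        rw [hrc]
        exact pres_set2 dist (r + dir.1) (c + dir.2) (lvl + 1) h6 p.1 p.2 (lvl + 1)
          (by omega) hv
      · simp only [List.mem_singleton] at hp
        subst hp
        refine ⟨⟨h1, h2, h3, h4⟩, ?_⟩
        rw [hrc]
        exact gget_set2_self dist _ _ _ _ _ hlt1 hlt2 rfl rfl
  · have hra : relaxA maze (R : Int) (C : Int) r c (dist, acc) dir = (dist, acc) := by
      simp only [relaxA]
      rw [if_neg hC]
    have hrb : relaxB maze (R : Int) (C : Int) lvl (dist, acc) (r + dir.1, c + dir.2) =
        (dist, acc) := by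
      simp only [relaxB]
      rw [if_neg hC]
    rw [hra, hrb]
    exact ⟨rfl, hsh, by simp, fun r' c' v _ hg => hg, hacc⟩

theorem dir_fold_spec (maze : List (List Int)) (R C : Nat) (lvl : Int) (hlvl : 0 ≤ lvl)
    (r c : Int) :
    ∀ (ds : List (Int × Int)) (dist : List (List Int)) (acc : List (Int × Int)),
      ShapeG R C dist → gget dist r c = lvl →
      (∀ p ∈ acc, InB R C p ∧ gget dist p.1 p.2 = lvl + 1) →
      (ds.foldl (relaxA maze (R : Int) (C : Int) r c) (dist, acc) =
        ds.foldl (fun s d => relaxB maze (R : Int) (C : Int) lvl s (r + d.1, c + d.2)) (dist, acc)) ∧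
      (let s := ds.foldl (relaxA maze (R : Int) (C : Int) r c) (dist, acc)
       ShapeG R C s.1 ∧ countNeg s.1 + s.2.length = countNeg dist + acc.length ∧
       (∀ r' c' v, v ≠ -1 → gget dist r' c' = v → gget s.1 r' c' = v) ∧
       (∀ p ∈ s.2, InB R C p ∧ gget s.1 p.1 p.2 = lvl + 1)) := by
  intro ds
  induction ds with
  | nil =>
    intro dist acc hsh hrc hacc
    exact ⟨rfl, hsh, by simp, fun _ _ _ _ hg => hg, hacc⟩
  | cons dir ds ih =>
    intro dist acc hsh hrc hacc
    obtain ⟨heq, hbund⟩ := relax_spec maze R C lvl hlvl r c dist acc dir hsh hrc hacc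
    rcases hs1 : relaxA maze (R : Int) (C : Int) r c (dist, acc) dir with ⟨d1, a1⟩
    rw [hs1] at heq hbund
    obtain ⟨hsh1, hcnt1, hpres1, hacc1⟩ := hbund
    have hrc1 : gget d1 r c = lvl := hpres1 r c lvl (by omega) hrc
    obtain ⟨ihe, ihsh, ihcnt, ihpres, ihacc⟩ := ih d1 a1 hsh1 hrc1 hacc1
    constructor
    · simp only [List.foldl_cons, hs1, ← heq]
      exact ihe
    · simp only [List.foldl_cons, hs1]
      refine ⟨ihsh, ihcnt.trans (by simpa using hcnt1), ?_, ihacc⟩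
      intro r' c' v hv hg
      exact ihpres _ _ _ hv (hpres1 _ _ _ hv hg)

theorem stepB_eq_fold (maze : List (List Int)) (rows cols lvl : Int)
    (s : List (List Int) × List (Int × Int)) (cell : Int × Int) :
    stepB maze rows cols lvl s cell =
      pvDirs.foldl (fun s d => relaxB maze rows cols lvl s (cell.1 + d.1, cell.2 + d.2)) s := by
  simp only [stepB, pvDirs, List.foldl_cons, List.foldl_nil]
  rw [show cell.1 + -1 = cell.1 - 1 by ring, show cell.2 + -1 = cell.2 - 1 by ring,
    show cell.1 + 0 = cell.1 by ring, show cell.2 + 0 = cell.2 by ring]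

theorem step_fold_spec (maze : List (List Int)) (R C : Nat) (lvl : Int) (hlvl : 0 ≤ lvl) :
    ∀ (xs : List (Int × Int)) (dist : List (List Int)) (acc : List (Int × Int)),
      ShapeG R C dist →
      (∀ p ∈ xs, gget dist p.1 p.2 = lvl) →
      (∀ p ∈ acc, InB R C p ∧ gget dist p.1 p.2 = lvl + 1) →
      (xs.foldl (stepA maze (R : Int) (C : Int)) (dist, acc) =
        xs.foldl (stepB maze (R : Int) (C : Int) lvl) (dist, acc)) ∧
      (let s := xs.foldl (stepA maze (R : Int) (C : Int)) (dist, acc)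
       ShapeG R C s.1 ∧ countNeg s.1 + s.2.length = countNeg dist + acc.length ∧
       (∀ r' c' v, v ≠ -1 → gget dist r' c' = v → gget s.1 r' c' = v) ∧
       (∀ p ∈ s.2, InB R C p ∧ gget s.1 p.1 p.2 = lvl + 1)) := by
  intro xs
  induction xs with
  | nil =>
    intro dist acc hsh _ hacc
    exact ⟨rfl, hsh, by simp, fun _ _ _ _ hg => hg, hacc⟩
  | cons cell xs ih =>
    intro dist acc hsh hxs hacc
    obtain ⟨de, dbund⟩ := dir_fold_spec maze R C lvl hlvl cell.1 cell.2 pvDirs dist acc hsh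
      (hxs cell List.mem_cons_self) hacc
    rcases hs1 : pvDirs.foldl (relaxA maze (R : Int) (C : Int) cell.1 cell.2) (dist, acc)
      with ⟨d1, a1⟩
    rw [hs1] at de dbund
    obtain ⟨dsh, dcnt, dpres, dacc⟩ := dbund
    have hxs' : ∀ p ∈ xs, gget d1 p.1 p.2 = lvl := fun p hp =>
      dpres _ _ _ (by omega) (hxs p (List.mem_cons_of_mem _ hp))
    obtain ⟨ihe, ihsh, ihcnt, ihpres, ihacc⟩ := ih d1 a1 dsh hxs' dacc
    have hstepA : stepA maze (R : Int) (C : Int) (dist, acc) cell = (d1, a1) := by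
      simp only [stepA]; exact hs1
    have hstepB : stepB maze (R : Int) (C : Int) lvl (dist, acc) cell = (d1, a1) := by
      rw [stepB_eq_fold, ← de]
    constructor
    · simp only [List.foldl_cons, hstepA, hstepB]
      exact ihe
    · simp only [List.foldl_cons, hstepA]
      refine ⟨ihsh, ihcnt.trans dcnt, ?_, ihacc⟩
      intro r' c' v hv hg
      exact ihpres _ _ _ hv (dpres _ _ _ hv hg)

theorem loopA_nil (maze : List (List Int)) (rows cols : Int) (f : Nat) (dist : List (List Int)) :
    loopA maze rows cols f dist [] = dist := by
  cases f <;> simp [loopA]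

theorem loopB_nil (maze : List (List Int)) (rows cols : Int) (f : Nat) (dist : List (List Int))
    (lvl : Int) : loopB maze rows cols f dist [] lvl = dist := by
  cases f <;> simp [loopB]

theorem loopA_consume (maze : List (List Int)) (rows cols : Int) (xs : List (Int × Int))
    (dist : List (List Int)) (f : Nat) (h : xs.length ≤ f) :
    loopA maze rows cols f dist xs =
      loopA maze rows cols (f - xs.length) (xs.foldl (stepA maze rows cols) (dist, [])).1
        (xs.foldl (stepA maze rows cols) (dist, [])).2 := by
  have hl := loopA_level maze rows cols xs [] dist (f - xs.length)
  rw [List.append_nil, List.nil_append, Nat.sub_add_cancel h] at hl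
  exact hl

-- main simulation: with enough fuel the FIFO queue and the layer expansion agree
theorem main_sim (maze : List (List Int)) (R C : Nat) :
    ∀ (n : Nat) (dist : List (List Int)) (frontier : List (Int × Int)) (lvl : Int)
      (F G : Nat),
      countNeg dist = n → ShapeG R C dist → 0 ≤ lvl →
      (∀ p ∈ frontier, gget dist p.1 p.2 = lvl) →
      n + frontier.length ≤ F → n + 2 ≤ G →
      loopA maze (R : Int) (C : Int) F dist frontier =
        loopB maze (R : Int) (C : Int) G dist frontier lvl := by
  intro n
  induction n using Nat.strong_induction_on with
  | _ n ih =>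
    intro dist frontier lvl F G hcnt hsh hlvl hfr hF hG
    obtain ⟨g, rfl⟩ : ∃ g, G = g + 1 := ⟨G - 1, by omega⟩
    match frontier with
    | [] => rw [loopA_nil, loopB_nil]
    | x :: fr =>
      obtain ⟨heq, hsh', hcnt', hpres', hacc'⟩ :=
        step_fold_spec maze R C lvl hlvl (x :: fr) dist [] hsh hfr (by simp)
      rcases ht : (x :: fr).foldl (stepA maze (R : Int) (C : Int)) (dist, []) with ⟨d1, a1⟩
      rw [ht] at heq hsh' hcnt' hpres' hacc'
      dsimp only at hsh' hcnt' hpres' hacc'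
      have hlenF : (x :: fr).length ≤ F := by omega
      have hA : loopA maze (R : Int) (C : Int) F dist (x :: fr) =
          loopA maze (R : Int) (C : Int) (F - (x :: fr).length) d1 a1 := by
        rw [loopA_consume maze (R : Int) (C : Int) (x :: fr) dist F hlenF, ht]
      have hB : loopB maze (R : Int) (C : Int) (g + 1) dist (x :: fr) lvl =
          loopB maze (R : Int) (C : Int) g d1 a1 (lvl + 1) := by
        simp only [loopB]
        rw [← heq]
      rw [hA, hB]
      match a1, hcnt', hacc' with
      | [], hcnt', hacc' =>
        rw [loopA_nil, loopB_nil]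
      | y :: ay, hcnt', hacc' =>
        have hlt : countNeg d1 < n := by
          simp only [List.length_cons, List.length_nil] at hcnt'
          omega
        exact ih (countNeg d1) hlt d1 (y :: ay) (lvl + 1) (F - (x :: fr).length) g rfl hsh'
          (by omega) (fun p hp => (hacc' p hp).2)
          (by simp only [List.length_cons, List.length_nil] at hcnt' hF ⊢; omega)
          (by simp only [List.length_cons, List.length_nil] at hcnt' hF ⊢; omega)

theorem relaxB_shape (maze : List (List Int)) (R C : Nat) (rows cols lvl : Int)
    (s : List (List Int) × List (Int × Int)) (nn : Int × Int) (h : ShapeG R C s.1) :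
    ShapeG R C (relaxB maze rows cols lvl s nn).1 := by
  simp only [relaxB]
  split_ifs with hc
  · exact shape_set2 _ _ _ _ _ _ h
  · exact h

theorem foldl_shape {γ : Type} (R C : Nat)
    (f : (List (List Int) × List (Int × Int)) → γ → (List (List Int) × List (Int × Int)))
    (hf : ∀ s x, ShapeG R C s.1 → ShapeG R C (f s x).1) :
    ∀ (l : List γ) (s), ShapeG R C s.1 → ShapeG R C (l.foldl f s).1 := by
  intro l
  induction l with
  | nil => intro s h; exact h
  | cons x t ih => intro s h; exact ih _ (hf s x h)

theorem stepB_shape (maze : List (List Int)) (R C : Nat) (rows cols lvl : Int)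
    (s : List (List Int) × List (Int × Int)) (cell : Int × Int) (h : ShapeG R C s.1) :
    ShapeG R C (stepB maze rows cols lvl s cell).1 := by
  simp only [stepB]
  exact foldl_shape R C _ (fun s x hx => relaxB_shape maze R C rows cols lvl s x hx) _ s h

-- shape is preserved by B's loop (used for the max/score equalities)
theorem loopB_shape (maze : List (List Int)) (R C : Nat) :
    ∀ (f : Nat) (dist : List (List Int)) (frontier : List (Int × Int)) (lvl : Int),
      ShapeG R C dist → ShapeG R C (loopB maze (R : Int) (C : Int) f dist frontier lvl) := by
  intro f
  induction f with
  | zero => intro dist frontier lvl h; simpa [loopB] using h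
  | succ f ih =>
    intro dist frontier lvl h
    match frontier with
    | [] => simpa [loopB] using h
    | x :: fr =>
      simp only [loopB]
      exact ih _ _ _ (foldl_shape R C _
        (fun s y hy => stepB_shape maze R C _ _ _ s y hy) (x :: fr) (dist, []) h)

theorem scanRowA_lt : ∀ (row : List Int) (c k ec : Nat),
    scanRowA row c k = some ec → ec < c + k := by
  intro row c k
  induction k generalizing c with
  | zero => intro ec h; simp [scanRowA] at h
  | succ k ih =>
    intro ec h
    simp only [scanRowA] at h
    split_ifs at h with h3
    · simp only [Option.some.injEq] at h
      omega
    · have := ih (c + 1) ec h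
      omega

theorem scanGridA_lt (maze : List (List Int)) (cols : Nat) :
    ∀ (r k : Nat) (er ec : Nat), scanGridA maze cols r k = some (er, ec) →
      er < r + k ∧ ec < cols := by
  intro r k
  induction k generalizing r with
  | zero => intro er ec h; simp [scanGridA] at h
  | succ k ih =>
    intro er ec h
    simp only [scanGridA] at h
    rcases hrow : scanRowA (maze.getD r []) 0 cols with _ | c
    · rw [hrow] at h
      have := ih (r + 1) er ec h
      omega
    · rw [hrow] at h
      simp only [Option.some.injEq, Prod.mk.injEq] at h
      obtain ⟨h1, h2⟩ := h
      have := scanRowA_lt (maze.getD r []) 0 cols c hrow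
      omega

theorem getD_range_map {α : Type} (l : List α) (d : α) :
    (List.range l.length).map (fun i => l.getD i d) = l := by
  induction l with
  | nil => simp
  | cons x xs ih =>
    simp only [List.length_cons, List.range_succ_eq_map, List.map_cons, List.map_map]
    refine congrArg₂ List.cons (by simp) ?_
    simpa [Function.comp_def] using ih

theorem filterMap_if (l : List Int) :
    l.filterMap (fun v => if v ≠ -1 then some v else none) = l.filter (fun v => v != -1) := by
  induction l with
  | nil => simp
  | cons x xs ih =>
    simp only [List.filterMap_cons, List.filter_cons, ih]
    by_cases hx : x = -1 <;> simp [hx]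

theorem flatMap_range {a b : Type} (l : List a) (d : a) (f : a -> List b) :
    (List.range l.length).flatMap (fun i => f (l.getD i d)) = l.flatMap f := by
  conv_rhs => rw [<- getD_range_map l d]
  rw [List.flatMap_map]

-- the max generators of A and B enumerate the same list
theorem maxReach_eq (dist : List (List Int)) (R C : Nat) (h : ShapeG R C dist) :
    maxReachA dist R C =
      (PySem.List.max? (dist.flatMap (fun row => row.filter (fun v => v != -1)))
        (fun x => x)).getD 0 := by
  have hstep : (List.range dist.length).flatMap (fun r =>
      (List.range C).filterMap (fun c =>
        let v := (dist.getD r []).getD c 0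
        if v ≠ -1 then some v else none)) =
      dist.flatMap (fun row => (List.range C).filterMap (fun c =>
        let v := row.getD c 0
        if v ≠ -1 then some v else none)) :=
    flatMap_range dist [] (fun row => (List.range C).filterMap (fun c =>
      let v := row.getD c 0
      if v ≠ -1 then some v else none))
  have hrow : forall row, row ∈ dist → (List.range C).filterMap (fun c =>
      let v := row.getD c 0
      if v ≠ -1 then some v else none) = row.filter (fun v => v != -1) := by
    intro row hrow
    have hlen := h.2 row hrow
    rw [← hlen]
    have h2 : row.filterMap (fun v => if v ≠ -1 then some v else none) =
        (List.range row.length).filterMap (fun c =>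
          let v := row.getD c 0
          if v ≠ -1 then some v else none) := by
      have h3 := List.filterMap_map (f := fun c => row.getD c 0)
        (g := fun v => if v ≠ -1 then some v else none) (l := List.range row.length)
      rw [getD_range_map] at h3
      exact h3
    rw [← h2, filterMap_if]
  simp only [maxReachA]
  rw [show List.range R = List.range dist.length from by rw [h.1], hstep,
    List.flatMap_congr hrow]

-- A's score double loop builds the same grid as B's nested map
theorem set2_length (g : List (List Int)) (a b : Nat) (v : Int) :
    (set2 g a b v).length = g.length := by
  simp [set2]

theorem foldl_len {g : Type} (f : List (List Int) → g → List (List Int))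
    (hf : ∀ sc x, (f sc x).length = sc.length) :
    ∀ (l : List g) (sc : List (List Int)), (l.foldl f sc).length = sc.length := by
  intro l
  induction l with
  | nil => intro sc; rfl
  | cons x t ih => intro sc; rw [List.foldl_cons, ih, hf]

theorem length_foldl_set (cs : List Nat) (row0 : List Int) (F : Nat → Int) :
    (cs.foldl (fun row c => row.set c (F c)) row0).length = row0.length := by
  induction cs generalizing row0 with
  | nil => rfl
  | cons c cs ih => rw [List.foldl_cons, ih, List.length_set]

theorem inner_fold_getElem? (F : Nat → Int) :
    ∀ (n : Nat) (row0 : List Int), n ≤ row0.length → ∀ (j : Nat),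
    ((List.range n).foldl (fun row c => row.set c (F c)) row0)[j]? =
      if j < n then some (F j) else row0[j]? := by
  intro n
  induction n with
  | zero => intro row0 _ j; simp
  | succ n ih =>
    intro row0 hn j
    rw [List.range_succ, List.foldl_append, List.foldl_cons, List.foldl_nil,
      List.getElem?_set]
    have hlen := length_foldl_set (List.range n) row0 F
    by_cases hj : n = j
    · subst hj
      rw [if_pos rfl, if_pos (by omega), if_pos (by omega)]
    · rw [if_neg hj, ih row0 (by omega) j]
      by_cases hjn : j < n
      · rw [if_pos hjn, if_pos (by omega)]
      · rw [if_neg hjn, if_neg (by omega)]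

theorem inner_fold_eq (C : Nat) (row0 : List Int) (F : Nat → Int) (h : row0.length = C) :
    (List.range C).foldl (fun row c => row.set c (F c)) row0 = (List.range C).map F := by
  apply List.ext_getElem?
  intro j
  rw [inner_fold_getElem? F C row0 (by omega) j]
  by_cases hj : j < C
  · rw [if_pos hj, List.getElem?_map, List.getElem?_range hj]
    rfl
  · rw [if_neg hj, List.getElem?_eq_none_iff.mpr (by omega),
      List.getElem?_eq_none_iff.mpr (by simpa using hj)]

theorem foldl_set2_fixed (cs : List Nat) (sc : List (List Int)) (r : Nat) (F : Nat → Int)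
    (hr : r < sc.length) :
    cs.foldl (fun sc c => set2 sc r c (F c)) sc =
      sc.set r (cs.foldl (fun row c => row.set c (F c)) (sc.getD r [])) := by
  induction cs generalizing sc with
  | nil =>
    have : sc.getD r [] = sc[r] := by
      simp [List.getD_eq_getElem?_getD, List.getElem?_eq_getElem hr]
    rw [List.foldl_nil, List.foldl_nil, this, List.set_getElem_self hr]
  | cons c cs ih =>
    rw [List.foldl_cons, ih (set2 sc r c (F c)) (by rw [set2_length]; exact hr),
      List.foldl_cons]
    unfold set2
    rw [List.set_set, getD_set_self _ _ _ _ hr]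

theorem outer_fold_getElem? (C : Nat) (G : Nat → Nat → Int) :
    ∀ (k : Nat) (sc0 : List (List Int)), k ≤ sc0.length → ∀ (j : Nat),
    ((List.range k).foldl (fun sc r =>
        (List.range C).foldl (fun sc c => set2 sc r c (G r c)) sc) sc0)[j]? =
      if j < k then
        some ((List.range C).foldl (fun row c => row.set c (G j c)) (sc0.getD j []))
      else sc0[j]? := by
  intro k
  induction k with
  | zero => intro sc0 _ j; simp
  | succ k ih =>
    intro sc0 hk j
    have hflen : ((List.range k).foldl (fun sc r =>
        (List.range C).foldl (fun sc c => set2 sc r c (G r c)) sc) sc0).length = sc0.length :=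
      foldl_len _ (fun sc r => foldl_len _ (fun sc' c => set2_length sc' r c (G r c)) _ sc) _ sc0
    rw [List.range_succ, List.foldl_append, List.foldl_cons, List.foldl_nil,
      foldl_set2_fixed (List.range C) _ k (G k) (by omega), List.getElem?_set]
    by_cases hj : k = j
    · subst hj
      have hgd : ((List.range k).foldl (fun sc r =>
          (List.range C).foldl (fun sc c => set2 sc r c (G r c)) sc) sc0).getD k [] =
          sc0.getD k [] := by
        rw [List.getD_eq_getElem?_getD, ih sc0 (by omega) k, if_neg (by omega),
          List.getD_eq_getElem?_getD]
      rw [if_pos rfl, if_pos (by omega), if_pos (by omega), hgd]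
    · rw [if_neg hj, ih sc0 (by omega) j]
      by_cases hjn : j < k
      · rw [if_pos hjn, if_pos (by omega)]
      · rw [if_neg hjn, if_neg (by omega)]

theorem map_comp_getD (row : List Int) (f : Int → Int) :
    (List.range row.length).map (fun c => f (row.getD c 0)) = row.map f := by
  conv_rhs => rw [← getD_range_map row 0]
  rw [List.map_map]
  rfl

theorem score_eq (dist : List (List Int)) (R C : Nat) (inf : Int) (h : ShapeG R C dist) :
    scoreA dist R C inf = dist.map (fun row => row.map (fun v => if v = -1 then inf else v)) := by
  apply List.ext_getElem?
  intro j
  have ho := outer_fold_getElem? C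
    (fun r c => if (dist.getD r []).getD c 0 = -1 then inf else (dist.getD r []).getD c 0)
    R (List.replicate R (List.replicate C 0)) (by simp) j
  have hsc : scoreA dist R C inf = (List.range R).foldl (fun sc r =>
      (List.range C).foldl (fun sc c => set2 sc r c
        (if (dist.getD r []).getD c 0 = -1 then inf else (dist.getD r []).getD c 0)) sc)
      (List.replicate R (List.replicate C 0)) := rfl
  rw [hsc, ho]
  by_cases hj : j < R
  · have hjd : j < dist.length := by rw [h.1]; omega
    have hdg : dist.getD j [] = dist[j] := by
      simp [List.getD_eq_getElem?_getD, List.getElem?_eq_getElem hjd]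
    have hrep : (List.replicate R (List.replicate C 0)).getD j [] =
        List.replicate C (0 : Int) := by
      simp [List.getD_eq_getElem?_getD, hj]
    have hrowlen : (dist[j]).length = C := h.2 _ (List.getElem_mem hjd)
    rw [if_pos hj, hrep,
      inner_fold_eq C _ _ (by simp),
      List.getElem?_map, List.getElem?_eq_getElem hjd]
    have : (List.range C).map
        (fun c => if (dist.getD j []).getD c 0 = -1 then inf else (dist.getD j []).getD c 0) =
        (dist[j]).map (fun v => if v = -1 then inf else v) := by
      rw [hdg, ← hrowlen]
      exact map_comp_getD dist[j] (fun v => if v = -1 then inf else v)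
    rw [this]
    rfl
  · rw [if_neg hj, List.getElem?_eq_none_iff.mpr (by simpa using hj),
      List.getElem?_eq_none_iff.mpr (by simp [h.1]; omega)]


-- ===== VERDICT (by name: the statement is the Claim_ definition above) =====
theorem compute_distance_score_spec : Claim_equal_compute_distance_score := by
  intro maze _hdom _hpre
  unfold Spec_compute_distance_score
  show compute_distance_score maze = compute_distance_score_alt maze
  rcases hscan : scanGridA maze (maze.headD []).length 0 maze.length with _ | ⟨er, ec⟩
  · simp only [compute_distance_score, compute_distance_score_alt, hscan]
  · simp only [compute_distance_score, compute_distance_score_alt, hscan]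
    have hb := scanGridA_lt maze (maze.headD []).length 0 maze.length er ec hscan
    have her : er < maze.length := by omega
    have hec : ec < (maze.headD []).length := hb.2
    have hrep : (List.replicate maze.length (List.replicate (maze.headD []).length (-1 : Int))).getD er [] =
        List.replicate (maze.headD []).length (-1 : Int) := by
      simp [List.getD_eq_getElem?_getD, her]
    have hlen0 : er < (List.replicate maze.length (List.replicate (maze.headD []).length (-1 : Int))).length := by
      simpa using her
    have hlen1 : ec < ((List.replicate maze.length (List.replicate (maze.headD []).length (-1 : Int))).getD er []).length := by
      rw [hrep]; simpa using hec
    have hsh1 : ShapeG maze.length (maze.headD []).length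
        (set2 (List.replicate maze.length (List.replicate (maze.headD []).length (-1 : Int))) er ec 0) :=
      shape_set2 _ _ _ _ _ _ ⟨by simp, by intro row hrow; simp_all [List.eq_of_mem_replicate hrow]⟩
    have hcnt0 : countNeg (List.replicate maze.length (List.replicate (maze.headD []).length (-1 : Int))) =
        maze.length * (maze.headD []).length := by
      simp [countNeg, List.map_replicate, List.sum_replicate, smul_eq_mul]
    have hcntd : countNeg (set2 (List.replicate maze.length (List.replicate (maze.headD []).length (-1 : Int))) er ec 0) + 1 =
        maze.length * (maze.headD []).length := by
      rw [countNeg_set2 _ _ _ _ hlen0 hlen1 (by rw [hrep, List.getD_eq_getElem?_getD, List.getElem?_replicate, if_pos hec]; rfl) (by norm_num)]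
      exact hcnt0
    have hg0 : gget (set2 (List.replicate maze.length (List.replicate (maze.headD []).length (-1 : Int))) er ec 0)
        ((er : Nat) : Int) ((ec : Nat) : Int) = 0 :=
      gget_set2_self _ _ _ _ _ _ hlen0 hlen1 (by simp) (by simp)
    have hmain := main_sim maze maze.length (maze.headD []).length
      (countNeg (set2 (List.replicate maze.length (List.replicate (maze.headD []).length (-1 : Int))) er ec 0))
      (set2 (List.replicate maze.length (List.replicate (maze.headD []).length (-1 : Int))) er ec 0)
      [(((er : Nat) : Int), ((ec : Nat) : Int))] 0
      (maze.length * (maze.headD []).length + 1) (maze.length * (maze.headD []).length + 1)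
      rfl hsh1 le_rfl
      (by intro p hp; simp only [List.mem_singleton] at hp; subst hp; exact hg0)
      (by simp only [List.length_cons, List.length_nil]; omega)
      (by omega)
    rw [hmain]
    have hshF := loopB_shape maze maze.length (maze.headD []).length
      (maze.length * (maze.headD []).length + 1)
      (set2 (List.replicate maze.length (List.replicate (maze.headD []).length (-1 : Int))) er ec 0)
      [(((er : Nat) : Int), ((ec : Nat) : Int))] 0 hsh1
    rw [maxReach_eq _ _ _ hshF, score_eq _ _ _ _ hshF]
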